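-- pv_equiv track=rewrite | github.com/GizawAAiT/Codeforces | B_Chocolates.py | chocolates_quadratic
-- ===== SOURCE A (Python) =====
-- def chocolates_quadratic(a):
--     n = len(a)
--     best = 0
--
--     for last in range(n):                       # O(n)
--         cur = a[last]
--         total = cur
--         for j in range(last - 1, -1, -1):       # O(n) per last
--             cur = min(a[j], cur - 1)
--             if cur <= 0:
--                 break
--             total += cur
--         best = max(best, total)
--     return best
-- ===== SOURCE B (Python) =====
-- def chocolates_quadratic(a):
--     # Monotonic stack over c_j = a[j] - j: each entry (s, m, q) covers indices
--     # [s .. next entry's start - 1] on which the suffix minimum of c equals m,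
--     # and q = sum over that segment of max(0, j + m) (closed form).
--     # S is the sum of all q's = best chain total ending at the current index.
--     stack = []          # top = stack[-1]
--     S = 0
--     best = 0
--     L = 0
--     for x in a:
--         c = x - L
--         s = L
--         while stack and stack[-1][1] >= c:
--             s0, m0, q0 = stack.pop()
--             S -= q0
--             s = s0
--         lo = s if s > 1 - c else 1 - c
--         if L < lo:
--             q = 0
--         else:
--             q = (L - lo + 1) * c + (lo + L) * (L - lo + 1) // 2
--         stack.append((s, c, q))
--         S += q
--         if S > best:
--             best = S
--         L += 1
--     return best
-- ===== Notes on version B (the rewrite author's own statement) =====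
-- stated objective: faster
-- what changed: Replaces A's per-endpoint O(n) backward greedy scans by a single forward pass keeping a monotonic stack of segments of c_j = a[j]-j with constant suffix-minimum, each segment's contribution computed by an arithmetic-series closed form, so the best chain total for every endpoint is maintained incrementally.
import Mathlib
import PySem

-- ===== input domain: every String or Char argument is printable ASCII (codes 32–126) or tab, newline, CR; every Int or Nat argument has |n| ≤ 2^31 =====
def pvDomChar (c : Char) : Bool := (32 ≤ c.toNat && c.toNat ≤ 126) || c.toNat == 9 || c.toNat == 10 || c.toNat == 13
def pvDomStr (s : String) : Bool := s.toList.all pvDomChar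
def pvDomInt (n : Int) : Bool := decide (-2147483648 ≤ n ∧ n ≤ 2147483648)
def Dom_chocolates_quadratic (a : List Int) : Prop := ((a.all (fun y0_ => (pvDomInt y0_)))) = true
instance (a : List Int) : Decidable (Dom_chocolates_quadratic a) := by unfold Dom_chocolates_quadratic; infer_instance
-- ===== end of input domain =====

-- B replaces A's O(n^2) per-endpoint backward scans by one forward pass with a
-- monotonic stack over c_j = a[j] - j and closed-form segment sums (objective: faster).

-- ===== PORT A =====
-- inner 'for j in range(last-1, -1, -1)' loop with its break, as a countdown recursion
def chocolInner (a : List Int) : Nat → Int → Int → Int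
  | 0, _, total => total
  | j+1, cur, total =>
      let cur' := min (PySem.List.pyGetD a (j : Int) 0) (cur - 1)
      if cur' ≤ 0 then total
      else chocolInner a j cur' (total + cur')

def chocolates_quadratic (a : List Int) : Int :=
  let n := a.length
  (List.range n).foldl (fun best (last : Nat) =>
    let cur := PySem.List.pyGetD a (last : Int) 0
    let total := chocolInner a last cur cur
    max best total) 0

-- ===== PORT B =====
-- 'while stack and stack[-1][1] >= c: pop' — returns (merged start, new running sum, stack)
def chocolPop (c : Int) : Int → Int → List (Int × Int × Int) → Int × Int × List (Int × Int × Int)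
  | s, S, [] => (s, S, [])
  | s, S, (s0, m0, q0) :: tl =>
      if c ≤ m0 then chocolPop c s0 (S - q0) tl
      else (s, S, (s0, m0, q0) :: tl)

-- closed-form sum of max(0, j+c) for j in [s, L]
def chocolSeg (s L c : Int) : Int :=
  let lo := if s > 1 - c then s else 1 - c
  if L < lo then 0
  else (L - lo + 1) * c + PySem.Int.floordiv ((lo + L) * (L - lo + 1)) 2

def chocolLoopGo (σ : List (Int × Int × Int)) (S best L : Int) : List Int → Int
  | [] => best
  | x :: rest =>
      let c := x - L
      match chocolPop c L S σ with
      | (s, S', σ') =>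
        let q := chocolSeg s L c
        let S'' := S' + q
        chocolLoopGo ((s, c, q) :: σ') S'' (if S'' > best then S'' else best) (L + 1) rest

def chocolates_quadratic_alt (a : List Int) : Int :=
  chocolLoopGo [] 0 0 0 a

-- ===== PRECONDITION & SPEC =====
def Spec_chocolates_quadratic (a : List Int) (out : Int) : Prop := out = chocolates_quadratic_alt a
instance (a : List Int) (out : Int) : Decidable (Spec_chocolates_quadratic a out) := by unfold Spec_chocolates_quadratic; infer_instance

-- ===== CLAIM (what is proved, stated in full; the proofs are below) =====
def Claim_equal_chocolates_quadratic : Prop := ∀ (a : List Int), Dom_chocolates_quadratic a → Spec_chocolates_quadratic a (chocolates_quadratic a)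

-- ===== LEMMAS AND PROOFS =====

-- c_j = a[j] - j
def chocolC (a : List Int) (j : Nat) : Int := a.getD j 0 - (j : Int)

-- suffix minimum of chocolC over [j, L]
def chocolM (a : List Int) (j L : Nat) : Int :=
  if _h : j < L then min (chocolC a j) (chocolM a (j+1) L) else chocolC a j
termination_by L - j

-- one summand: max(0, j + suffix-min)
def chocolT (a : List Int) (L j : Nat) : Int := max 0 ((j : Int) + chocolM a j L)

-- prefix sum of summands: Σ_{j<k} chocolT a L j
def chocolPS (a : List Int) (L k : Nat) : Int := ∑ j ∈ Finset.range k, chocolT a L j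

-- stack decoding: chocolRep a last σ e — σ (top first) covers indices [0, e)
def chocolRep (a : List Int) (last : Nat) : List (Int × Int × Int) → Nat → Prop
  | [], e => e = 0
  | (s, m, q) :: tl, e =>
      ∃ sN : Nat, s = (sN : Int) ∧ sN < e ∧
        (∀ j : Nat, sN ≤ j → j < e → chocolM a j last = m) ∧
        q = ∑ j ∈ Finset.Ico sN e, chocolT a last j ∧
        chocolRep a last tl sN

lemma chocolM_self (a : List Int) (L : Nat) : chocolM a L L = chocolC a L := by
  rw [chocolM]; simp

lemma chocolM_step (a : List Int) {j L : Nat} (h : j < L) :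
    chocolM a j L = min (chocolC a j) (chocolM a (j+1) L) := by
  rw [chocolM]; simp [h]

lemma chocolM_mono (a : List Int) {L : Nat} :
    ∀ (j' j : Nat), j ≤ j' → j' ≤ L → chocolM a j L ≤ chocolM a j' L := by
  intro j'
  induction j' with
  | zero =>
      intro j h1 _
      have hj : j = 0 := by omega
      subst hj; exact le_refl _
  | succ i ih =>
      intro j h1 h2
      rcases Nat.lt_or_ge j (i+1) with hlt | hge
      · have hi : chocolM a i L ≤ chocolM a (i+1) L := by
          rw [chocolM_step a (show i < L by omega)]; exact min_le_right _ _
        exact le_trans (ih j (by omega) (by omega)) hi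
      · have hj : j = i + 1 := by omega
        subst hj; exact le_refl _

lemma chocolM_extend (a : List Int) (L : Nat) :
    ∀ d j, j + d = L → chocolM a j (L+1) = min (chocolM a j L) (chocolC a (L+1)) := by
  intro d
  induction d with
  | zero =>
      intro j h
      have hj : j = L := by omega
      subst hj
      rw [chocolM_step a (show j < j + 1 by omega), chocolM_self, chocolM_self]
  | succ d ih =>
      intro j h
      have hjL : j < L := by omega
      rw [chocolM_step a (show j < L + 1 by omega), chocolM_step a hjL,
        ih (j+1) (by omega), min_assoc]

-- ===== A-side: the inner loop sums the positive parts of j + suffix-min =====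

lemma chocolInner_eq (a : List Int) (last : Nat) :
    ∀ (j : Nat) (t : Int), j ≤ last →
      chocolInner a j ((j : Int) + chocolM a j last) t = t + chocolPS a last j := by
  intro j
  induction j with
  | zero => intro t _; simp [chocolInner, chocolPS]
  | succ j ih =>
      intro t h
      have hcast : (((j+1 : Nat)) : Int) = ((j : Nat) : Int) + 1 := by push_cast; ring
      rw [hcast]
      rw [chocolInner]
      have hcur : min (PySem.List.pyGetD a ((j : Nat) : Int) 0)
          (((j : Nat) : Int) + 1 + chocolM a (j+1) last - 1)
          = (j : Int) + chocolM a j last := by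
        have hg : PySem.List.pyGetD a ((j : Nat) : Int) 0 = a.getD j 0 := by simp
        rw [hg, chocolM_step a (show j < last by omega)]
        have h1 : a.getD j 0 = (j : Int) + chocolC a j := by unfold chocolC; ring
        rw [h1]
        have h2 : ((j : Nat) : Int) + 1 + chocolM a (j+1) last - 1
            = (j : Int) + chocolM a (j+1) last := by ring
        rw [h2]
        omega
      simp only [hcur]
      by_cases hpos : (j : Int) + chocolM a j last ≤ 0
      · rw [if_pos hpos]
        have hz : chocolPS a last (j+1) = 0 := by
          unfold chocolPS
          apply Finset.sum_eq_zero
          intro i hi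
          have hi' : i ≤ j := by
            have := Finset.mem_range.mp hi; omega
          unfold chocolT
          have h1 : chocolM a i last ≤ chocolM a j last :=
            chocolM_mono a j i hi' (by omega)
          have h2 : (i : Int) ≤ (j : Int) := by exact_mod_cast hi'
          omega
        rw [hz]; ring
      · rw [if_neg hpos]
        rw [ih (t + ((j : Int) + chocolM a j last)) (by omega)]
        unfold chocolPS
        rw [Finset.sum_range_succ]
        have hT : chocolT a last j = (j : Int) + chocolM a j last := by
          unfold chocolT; omega
        rw [hT]; ring

lemma chocolTotal (a : List Int) (last : Nat) :
    chocolInner a last (PySem.List.pyGetD a ((last : Nat) : Int) 0)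
        (PySem.List.pyGetD a ((last : Nat) : Int) 0)
      = a.getD last 0 + chocolPS a last last := by
  have hg : PySem.List.pyGetD a ((last : Nat) : Int) 0 = a.getD last 0 := by simp
  have hc : a.getD last 0 = (last : Int) + chocolM a last last := by
    rw [chocolM_self]; unfold chocolC; ring
  rw [hg]
  have h2 := chocolInner_eq a last last (a.getD last 0) (le_refl _)
  rw [← hc] at h2
  exact h2

lemma chocolPS_succ (a : List Int) (L k : Nat) :
    chocolPS a L (k+1) = chocolPS a L k + chocolT a L k := by
  unfold chocolPS; rw [Finset.sum_range_succ]

lemma chocolA3 (a : List Int) (l : Nat) (b : Int) (hb : 0 ≤ b) :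
    max b (a.getD l 0 + chocolPS a l l) = max b (chocolPS a l (l+1)) := by
  have hc : a.getD l 0 = (l : Int) + chocolM a l l := by
    rw [chocolM_self]; unfold chocolC; ring
  rw [chocolPS_succ]
  by_cases hp : (0 : Int) < a.getD l 0
  · have hT : chocolT a l l = a.getD l 0 := by
      unfold chocolT; rw [← hc]; omega
    rw [hT]
    omega
  · have hT : chocolT a l l = 0 := by
      unfold chocolT; rw [← hc]; omega
    have hz : chocolPS a l l = 0 := by
      unfold chocolPS
      apply Finset.sum_eq_zero
      intro i hi
      have hi' : i ≤ l := by have := Finset.mem_range.mp hi; omega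
      unfold chocolT
      have h1 : chocolM a i l ≤ chocolM a l l := chocolM_mono a l i hi' (le_refl _)
      have h2 : (i : Int) ≤ (l : Int) := by exact_mod_cast hi'
      have h3 : (l : Int) + chocolM a l l ≤ 0 := by rw [← hc]; omega
      omega
    rw [hT, hz]
    omega

lemma chocolAfold (a : List Int) :
    ∀ (xs : List Nat) (b : Int), 0 ≤ b →
      xs.foldl (fun best (last : Nat) =>
          let cur := PySem.List.pyGetD a (last : Int) 0
          let total := chocolInner a last cur cur
          max best total) b
        = xs.foldl (fun b l => max b (chocolPS a l (l+1))) b := by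
  intro xs
  induction xs with
  | nil => intro b _; rfl
  | cons x xs ih =>
      intro b hb
      simp only [List.foldl_cons]
      rw [chocolTotal a x, chocolA3 a x b hb]
      exact ih _ (le_trans hb (le_max_left _ _))

lemma chocolA_eq (a : List Int) :
    chocolates_quadratic a
      = (List.range a.length).foldl (fun b l => max b (chocolPS a l (l+1))) 0 := by
  unfold chocolates_quadratic
  exact chocolAfold a (List.range a.length) 0 (le_refl _)

-- ===== B-side: closed-form segment sum =====

lemma chocolFd2 (k : Int) : PySem.Int.floordiv (2 * k) 2 = k := by
  rw [PySem.Int.floordiv_eq_ediv_of_pos (by norm_num)]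
  exact Int.mul_ediv_cancel_left k (by norm_num)

lemma chocolGauss : ∀ (n : Nat) (lo : Int),
    (lo + (lo + (n : Int))) * ((n : Int) + 1)
      = 2 * ∑ j ∈ Finset.range (n+1), (lo + (j : Int)) := by
  intro n
  induction n with
  | zero => intro lo; simp; ring
  | succ n ih =>
      intro lo
      rw [Finset.sum_range_succ]
      have h := ih lo
      push_cast at h ⊢
      linear_combination h

lemma chocolSeg_core (loN L : Nat) (c : Int) (hle : loN ≤ L) (hpos : (1 : Int) ≤ (loN : Int) + c) :
    (((L : Nat) : Int) - ((loN : Nat) : Int) + 1) * c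
        + PySem.Int.floordiv ((((loN : Nat) : Int) + ((L : Nat) : Int))
            * (((L : Nat) : Int) - ((loN : Nat) : Int) + 1)) 2
      = ∑ j ∈ Finset.Ico loN (L+1), max 0 ((j : Int) + c) := by
  have heach : ∀ j ∈ Finset.Ico loN (L+1), max 0 ((j : Int) + c) = (j : Int) + c := by
    intro j hj
    obtain ⟨h1, _⟩ := Finset.mem_Ico.mp hj
    have : ((loN : Nat) : Int) ≤ ((j : Nat) : Int) := by exact_mod_cast h1
    omega
  rw [Finset.sum_congr rfl heach, Finset.sum_Ico_eq_sum_range]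
  have hcnt : L + 1 - loN = L - loN + 1 := by omega
  rw [hcnt]
  have hbody : ∀ j ∈ Finset.range (L - loN + 1),
      (((loN + j : Nat) : Int) + c) = ((loN : Int) + (j : Int)) + c := by
    intro j _; push_cast; ring
  rw [Finset.sum_congr rfl hbody, Finset.sum_add_distrib, Finset.sum_const, Finset.card_range,
    nsmul_eq_mul]
  have hfd : PySem.Int.floordiv ((((loN : Nat) : Int) + ((L : Nat) : Int))
      * (((L : Nat) : Int) - ((loN : Nat) : Int) + 1)) 2
      = ∑ j ∈ Finset.range (L - loN + 1), ((loN : Int) + (j : Int)) := by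
    have hLs : ((L - loN : Nat) : Int) = (L : Int) - (loN : Int) := by omega
    have harg : (((loN : Nat) : Int) + ((L : Nat) : Int)) * (((L : Nat) : Int) - ((loN : Nat) : Int) + 1)
        = ((loN : Int) + ((loN : Int) + ((L - loN : Nat) : Int))) * (((L - loN : Nat) : Int) + 1) := by
      rw [hLs]; ring
    rw [harg, chocolGauss (L - loN) ((loN : Nat) : Int), chocolFd2]
  rw [hfd]
  have hLs2 : ((L - loN + 1 : Nat) : Int) = (L : Int) - (loN : Int) + 1 := by omega
  rw [hLs2]
  ring

lemma chocolSeg_sum (sN L : Nat) (c : Int) (h : sN ≤ L) :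
    chocolSeg ((sN : Nat) : Int) ((L : Nat) : Int) c
      = ∑ j ∈ Finset.Ico sN (L+1), max 0 ((j : Int) + c) := by
  unfold chocolSeg
  by_cases hlo : ((sN : Nat) : Int) > 1 - c
  · rw [if_pos hlo, if_neg (by
      have : ((sN : Nat) : Int) ≤ ((L : Nat) : Int) := by exact_mod_cast h
      omega)]
    exact chocolSeg_core sN L c h (by omega)
  · rw [if_neg hlo]
    by_cases hL : ((L : Nat) : Int) < 1 - c
    · rw [if_pos hL]
      symm
      apply Finset.sum_eq_zero
      intro j hj
      obtain ⟨_, h2⟩ := Finset.mem_Ico.mp hj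
      have : ((j : Nat) : Int) ≤ ((L : Nat) : Int) := by exact_mod_cast Nat.lt_succ_iff.mp h2
      omega
    · rw [if_neg hL]
      have hc1 : (0 : Int) ≤ 1 - c := by
        have : (0 : Int) ≤ ((sN : Nat) : Int) := by positivity
        omega
      set loN : Nat := (1 - c).toNat with hloN
      have hloC : ((loN : Nat) : Int) = 1 - c := by
        rw [hloN]; exact Int.toNat_of_nonneg hc1
      have hsL : sN ≤ loN := by
        have h1 : ((sN : Nat) : Int) ≤ ((loN : Nat) : Int) := by omega
        exact_mod_cast h1
      have hlL : loN ≤ L := by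
        have h1 : ((loN : Nat) : Int) ≤ ((L : Nat) : Int) := by omega
        exact_mod_cast h1
      rw [← Finset.sum_Ico_consecutive _ (show sN ≤ loN by omega) (show loN ≤ L + 1 by omega)]
      have hz : ∑ j ∈ Finset.Ico sN loN, max 0 ((j : Int) + c) = 0 := by
        apply Finset.sum_eq_zero
        intro j hj
        obtain ⟨_, h2⟩ := Finset.mem_Ico.mp hj
        have : ((j : Nat) : Int) < ((loN : Nat) : Int) := by exact_mod_cast h2
        omega
      rw [hz, zero_add, ← hloC]
      exact chocolSeg_core loN L c hlL (by omega)

-- ===== B-side: the stack invariant =====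

lemma chocolRep_congr (a : List Int) (last last' : Nat) :
    ∀ (σ : List (Int × Int × Int)) (e : Nat),
      (∀ j, j < e → chocolM a j last' = chocolM a j last) →
      chocolRep a last σ e → chocolRep a last' σ e := by
  intro σ
  induction σ with
  | nil => intro e _ h; exact h
  | cons hd tl ih =>
      obtain ⟨s, m, q⟩ := hd
      intro e hM hrep
      obtain ⟨sN, rfl, hlt, hconst, hq, htl⟩ := hrep
      refine ⟨sN, rfl, hlt, ?_, ?_, ih sN (fun j hj => hM j (by omega)) htl⟩
      · intro j h1 h2; rw [hM j h2]; exact hconst j h1 h2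
      · rw [hq]
        apply Finset.sum_congr rfl
        intro j hj
        obtain ⟨_, h2⟩ := Finset.mem_Ico.mp hj
        unfold chocolT
        rw [hM j h2]

lemma chocolPop_spec (a : List Int) (last : Nat) (c : Int) :
    ∀ (σ : List (Int × Int × Int)) (e : Nat) (S : Int), chocolRep a last σ e →
      ∃ (sN : Nat) (σ' : List (Int × Int × Int)),
        chocolPop c ((e : Nat) : Int) S σ
            = (((sN : Nat) : Int), S - ∑ j ∈ Finset.Ico sN e, chocolT a last j, σ')
        ∧ sN ≤ e
        ∧ chocolRep a last σ' sN
        ∧ (∀ j, sN ≤ j → j < e → c ≤ chocolM a j last)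
        ∧ (sN = 0 ∨ chocolM a (sN - 1) last < c) := by
  intro σ
  induction σ with
  | nil =>
      intro e S hrep
      have he : e = 0 := hrep
      subst he
      refine ⟨0, [], by simp [chocolPop], le_refl _, by simp [chocolRep], ?_, Or.inl rfl⟩
      intro j h1 h2
      exact absurd h2 (Nat.not_lt_zero j)
  | cons hd tl ih =>
      obtain ⟨s, m, q⟩ := hd
      intro e S hrep
      obtain ⟨sN0, rfl, hlt, hconst, hq, htl⟩ := hrep
      by_cases hcm : c ≤ m
      · obtain ⟨sN, σ', heq, hle, hrep', hge, hl⟩ := ih sN0 (S - q) htl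
        refine ⟨sN, σ', ?_, by omega, hrep', ?_, hl⟩
        · rw [chocolPop, if_pos hcm, heq]
          have hsum : S - q - ∑ j ∈ Finset.Ico sN sN0, chocolT a last j
              = S - ∑ j ∈ Finset.Ico sN e, chocolT a last j := by
            rw [hq, ← Finset.sum_Ico_consecutive (f := fun j => chocolT a last j)
              (show sN ≤ sN0 by omega) (show sN0 ≤ e by omega)]
            ring
          rw [hsum]
        · intro j h1 h2
          rcases Nat.lt_or_ge j sN0 with hj | hj
          · exact hge j h1 hj
          · rw [hconst j hj h2]; exact hcm
      · refine ⟨e, (((sN0 : Nat) : Int), m, q) :: tl, ?_, le_refl _,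
          ⟨sN0, rfl, hlt, hconst, hq, htl⟩, ?_, Or.inr ?_⟩
        · rw [chocolPop, if_neg hcm]
          simp
        · intro j h1 h2; omega
        · rw [hconst (e-1) (by omega) (by omega)]
          omega

lemma chocolStep (a : List Int) (k : Nat) (σ : List (Int × Int × Int)) (S : Int)
    (hrep : chocolRep a (k-1) σ k) (hS : S = chocolPS a (k-1) k) :
    ∃ (sN : Nat) (S' : Int) (σ' : List (Int × Int × Int)),
      chocolPop (chocolC a k) ((k : Nat) : Int) S σ = (((sN : Nat) : Int), S', σ')
      ∧ chocolRep a k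
          ((((sN : Nat) : Int), chocolC a k,
            chocolSeg ((sN : Nat) : Int) ((k : Nat) : Int) (chocolC a k)) :: σ') (k+1)
      ∧ S' + chocolSeg ((sN : Nat) : Int) ((k : Nat) : Int) (chocolC a k) = chocolPS a k (k+1) := by
  obtain ⟨sN, σ', heq, hle, hrep', hge, hl⟩ := chocolPop_spec a (k-1) (chocolC a k) σ k S hrep
  have hext : ∀ j, j < k → chocolM a j k = min (chocolM a j (k-1)) (chocolC a k) := by
    intro j hj
    have hk1 : k - 1 + 1 = k := by omega
    have h := chocolM_extend a (k-1) (k-1-j) j (by omega)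
    rw [hk1] at h
    exact h
  have hmerge : ∀ j, sN ≤ j → j ≤ k → chocolM a j k = chocolC a k := by
    intro j h1 h2
    rcases Nat.lt_or_ge j k with hj | hj
    · rw [hext j hj]
      have := hge j h1 hj
      omega
    · have hjk : j = k := by omega
      rw [hjk]
      exact chocolM_self a k
  have hkeep : ∀ j, j < sN → chocolM a j k = chocolM a j (k-1) := by
    intro j hj
    rcases hl with h0 | hlast
    · omega
    · have hb : chocolM a j (k-1) ≤ chocolM a (sN-1) (k-1) :=
        chocolM_mono a (sN-1) j (by omega) (by omega)
      rw [hext j (by omega)]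
      omega
  have hkeepT : ∀ j, j < sN → chocolT a k j = chocolT a (k-1) j := by
    intro j hj; unfold chocolT; rw [hkeep j hj]
  refine ⟨sN, S - ∑ j ∈ Finset.Ico sN k, chocolT a (k-1) j, σ', heq, ?_, ?_⟩
  · refine ⟨sN, rfl, by omega, ?_, ?_, ?_⟩
    · intro j h1 h2
      exact hmerge j h1 (by omega)
    · rw [chocolSeg_sum sN k (chocolC a k) hle]
      apply Finset.sum_congr rfl
      intro j hj
      obtain ⟨h1, h2⟩ := Finset.mem_Ico.mp hj
      unfold chocolT
      rw [hmerge j h1 (by omega)]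
    · exact chocolRep_congr a (k-1) k σ' sN hkeep hrep'
  · rw [chocolSeg_sum sN k (chocolC a k) hle]
    have hT : ∀ j ∈ Finset.Ico sN (k+1), max 0 ((j : Int) + chocolC a k) = chocolT a k j := by
      intro j hj
      obtain ⟨h1, h2⟩ := Finset.mem_Ico.mp hj
      unfold chocolT
      rw [hmerge j h1 (by omega)]
    rw [Finset.sum_congr rfl hT]
    have hPSk : chocolPS a k (k+1)
        = (∑ j ∈ Finset.Ico 0 sN, chocolT a k j) + ∑ j ∈ Finset.Ico sN (k+1), chocolT a k j := by
      unfold chocolPS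
      rw [Finset.range_eq_Ico,
        ← Finset.sum_Ico_consecutive (f := fun j => chocolT a k j) (Nat.zero_le sN) (by omega)]
    have hSsplit : S = (∑ j ∈ Finset.Ico 0 sN, chocolT a (k-1) j)
        + ∑ j ∈ Finset.Ico sN k, chocolT a (k-1) j := by
      rw [hS]; unfold chocolPS
      rw [Finset.range_eq_Ico,
        ← Finset.sum_Ico_consecutive (f := fun j => chocolT a (k-1) j) (Nat.zero_le sN) (by omega)]
    have hfirst : ∑ j ∈ Finset.Ico 0 sN, chocolT a k j
        = ∑ j ∈ Finset.Ico 0 sN, chocolT a (k-1) j := by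
      apply Finset.sum_congr rfl
      intro j hj
      obtain ⟨_, h2⟩ := Finset.mem_Ico.mp hj
      exact hkeepT j h2
    rw [hPSk, hfirst, hSsplit]
    ring

lemma chocolDrop_getD (a : List Int) (k : Nat) (x : Int) (rest : List Int)
    (h : a.drop k = x :: rest) : a.getD k 0 = x := by
  have h0 : (a.drop k)[0]? = some x := by rw [h]; rfl
  rw [List.getElem?_drop] at h0
  simp only [Nat.add_zero] at h0
  rw [List.getD_eq_getElem?_getD, h0]
  rfl

lemma chocolLoopGo_eq (a : List Int) :
    ∀ (rest : List Int) (k : Nat) (σ : List (Int × Int × Int)) (S best : Int),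
      a.drop k = rest → chocolRep a (k-1) σ k → S = chocolPS a (k-1) k →
      chocolLoopGo σ S best ((k : Nat) : Int) rest
        = (List.range' k rest.length).foldl (fun b l => max b (chocolPS a l (l+1))) best := by
  intro rest
  induction rest with
  | nil => intro k σ S best _ _ _; rfl
  | cons x rest' ih =>
      intro k σ S best hdrop hrep hS
      have hx : x = a.getD k 0 := (chocolDrop_getD a k x rest' hdrop).symm
      have hc : x - ((k : Nat) : Int) = chocolC a k := by rw [hx]; unfold chocolC; ring
      obtain ⟨sN, S', σ', heq, hrep'', hS''⟩ := chocolStep a k σ S hrep hS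
      rw [chocolLoopGo]
      simp only [hc, heq]
      have hdrop' : a.drop (k+1) = rest' := by
        have hdd : a.drop (k+1) = (a.drop k).drop 1 := by rw [List.drop_drop]
        rw [hdd, hdrop]
        rfl
      have hrep3 : chocolRep a ((k+1)-1) ((((sN : Nat) : Int), chocolC a k,
          chocolSeg ((sN : Nat) : Int) ((k : Nat) : Int) (chocolC a k)) :: σ') (k+1) := by
        simpa using hrep''
      have hS3 : S' + chocolSeg ((sN : Nat) : Int) ((k : Nat) : Int) (chocolC a k)
          = chocolPS a ((k+1)-1) (k+1) := by
        simpa using hS''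
      have hrec := ih (k+1) _ _
        (if S' + chocolSeg ((sN : Nat) : Int) ((k : Nat) : Int) (chocolC a k) > best
          then S' + chocolSeg ((sN : Nat) : Int) ((k : Nat) : Int) (chocolC a k) else best)
        hdrop' hrep3 hS3
      have hcast : ((k : Nat) : Int) + 1 = (((k+1 : Nat)) : Int) := by push_cast; ring
      rw [hcast, hrec]
      have hrange : List.range' k (x :: rest').length = k :: List.range' (k+1) rest'.length := by
        simp [List.range'_succ]
      rw [hrange, List.foldl_cons]
      congr 1
      rw [hS'']
      rcases le_or_gt (chocolPS a k (k+1)) best with hble | hble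
      · rw [if_neg (by omega), max_eq_left hble]
      · rw [if_pos (by omega), max_eq_right (le_of_lt hble)]

lemma chocolB_eq (a : List Int) :
    chocolates_quadratic_alt a
      = (List.range' 0 a.length).foldl (fun b l => max b (chocolPS a l (l+1))) 0 := by
  unfold chocolates_quadratic_alt
  have h := chocolLoopGo_eq a a 0 [] 0 0 (by simp) (by simp [chocolRep]) (by simp [chocolPS])
  simpa using h

-- ===== VERDICT (by name: the statement is the Claim_ definition above) =====
theorem chocolates_quadratic_spec : Claim_equal_chocolates_quadratic := by
  intro a _
  unfold Spec_chocolates_quadratic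
  rw [chocolA_eq, chocolB_eq, List.range_eq_range']
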